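-- pv_equiv track=rewrite | github.com/spapas/aoc15 | day21.py | allowed_combination
-- ===== SOURCE A (Python) =====
-- def allowed_combination(items):
--     weapon_count = len([w for w in items if w['kind'] == 'W' ])
--     if weapon_count != 1:
--         return False
--     armor_count = len([w for w in items if w['kind'] == 'A' ])
--     if armor_count > 1:
--         return False
--     ring_count = len([w for w in items if w['kind'] == 'R' ])
--     if ring_count > 2:
--         return False
--     return True
-- ===== SOURCE B (Python) =====
-- def allowed_combination(items):
--     # One tabulating pass instead of three filter scans.
--     wc = ac = rc = 0
--     for w in items:
--         k = w['kind']
--         if k == 'W':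
--             wc += 1
--         elif k == 'A':
--             ac += 1
--         elif k == 'R':
--             rc += 1
--     return wc == 1 and ac <= 1 and rc <= 2
-- ===== Notes on version B (the rewrite author's own statement) =====
-- stated objective: simpler
-- what changed: Replaces A's three separate filtering scans (one per kind) with a single pass that tabulates all three counts, then evaluates the thresholds as one boolean expression.
import Mathlib
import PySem

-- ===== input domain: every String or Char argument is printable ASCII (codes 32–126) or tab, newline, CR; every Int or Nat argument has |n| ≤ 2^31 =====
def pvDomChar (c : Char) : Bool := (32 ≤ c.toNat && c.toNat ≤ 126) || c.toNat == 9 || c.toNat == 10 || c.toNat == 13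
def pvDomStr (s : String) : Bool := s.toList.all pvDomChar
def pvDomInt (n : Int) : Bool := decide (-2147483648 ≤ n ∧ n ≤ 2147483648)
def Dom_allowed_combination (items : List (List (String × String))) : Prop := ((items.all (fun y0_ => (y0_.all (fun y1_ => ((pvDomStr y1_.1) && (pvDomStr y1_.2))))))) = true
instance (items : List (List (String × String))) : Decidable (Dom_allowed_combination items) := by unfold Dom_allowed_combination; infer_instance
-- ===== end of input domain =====

-- B replaces A's three separate filter scans with a single tabulating pass over the items (objective: simpler).


-- ===== PORT A =====
-- w['kind'] is ported as Dict.getD w "kind" ""; exact under Pre_ (every item has a "kind" key, so no KeyError).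
def allowed_combination (items : List (List (String × String))) : Bool :=
  let weapon_count := (items.filter (fun w => PySem.Dict.getD (PySem.Dict.mk w) "kind" "" == "W")).length
  if weapon_count ≠ 1 then false
  else
    let armor_count := (items.filter (fun w => PySem.Dict.getD (PySem.Dict.mk w) "kind" "" == "A")).length
    if armor_count > 1 then false
    else
      let ring_count := (items.filter (fun w => PySem.Dict.getD (PySem.Dict.mk w) "kind" "" == "R")).length
      if ring_count > 2 then false
      else true

-- ===== PORT B =====
-- single pass accumulating the three counts; same getD "" convention, exact under Pre_
def allowed_combination_alt (items : List (List (String × String))) : Bool :=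
  let c := items.foldl (fun (c : Nat × Nat × Nat) w =>
    let k := PySem.Dict.getD (PySem.Dict.mk w) "kind" ""
    if k == "W" then (c.1 + 1, c.2.1, c.2.2)
    else if k == "A" then (c.1, c.2.1 + 1, c.2.2)
    else if k == "R" then (c.1, c.2.1, c.2.2 + 1)
    else c) (0, 0, 0)
  decide (c.1 = 1) && decide (c.2.1 ≤ 1) && decide (c.2.2 ≤ 2)

-- ===== PRECONDITION & SPEC =====
-- Pre_ excludes items lacking a "kind" key, on which the Python A raises KeyError.
def Pre_allowed_combination (items : List (List (String × String))) : Prop :=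
  ∀ w ∈ items, (PySem.Dict.get? (PySem.Dict.mk w) "kind").isSome = true
instance (items : List (List (String × String))) : Decidable (Pre_allowed_combination items) := by unfold Pre_allowed_combination; infer_instance
def pvWitness_allowed_combination : (List (List (String × String))) := ([[("kind", "W")], [("kind", "R")]])
def Spec_allowed_combination (items : List (List (String × String))) (out : Bool) : Prop := out = allowed_combination_alt items
instance (items : List (List (String × String))) (out : Bool) : Decidable (Spec_allowed_combination items out) := by unfold Spec_allowed_combination; infer_instance

-- ===== CLAIM (what is proved, stated in full; the proofs are below) =====
def Claim_equal_allowed_combination : Prop := ∀ (items : List (List (String × String))), Dom_allowed_combination items → Pre_allowed_combination items → Spec_allowed_combination items (allowed_combination items)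

-- ===== LEMMAS AND PROOFS =====

theorem ac_fold_counts (items : List (List (String × String))) (a : Nat × Nat × Nat) :
    items.foldl (fun (c : Nat × Nat × Nat) w =>
      let k := PySem.Dict.getD (PySem.Dict.mk w) "kind" ""
      if k == "W" then (c.1 + 1, c.2.1, c.2.2)
      else if k == "A" then (c.1, c.2.1 + 1, c.2.2)
      else if k == "R" then (c.1, c.2.1, c.2.2 + 1)
      else c) a
    = (a.1 + (items.filter (fun w => PySem.Dict.getD (PySem.Dict.mk w) "kind" "" == "W")).length,
       a.2.1 + (items.filter (fun w => PySem.Dict.getD (PySem.Dict.mk w) "kind" "" == "A")).length,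
       a.2.2 + (items.filter (fun w => PySem.Dict.getD (PySem.Dict.mk w) "kind" "" == "R")).length) := by
  induction items generalizing a with
  | nil => simp
  | cons h t ih =>
    simp only [List.foldl_cons, ih, List.filter_cons]
    by_cases hW : PySem.Dict.getD (PySem.Dict.mk h) "kind" "" = "W"
    · simp [hW, Prod.ext_iff]; omega
    · by_cases hA : PySem.Dict.getD (PySem.Dict.mk h) "kind" "" = "A"
      · simp [hA, Prod.ext_iff]; omega
      · by_cases hR : PySem.Dict.getD (PySem.Dict.mk h) "kind" "" = "R"
        · simp [hR, Prod.ext_iff]; omega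
        · simp [hW, hA, hR]

-- ===== VERDICT (by name: the statement is the Claim_ definition above) =====
theorem allowed_combination_spec : Claim_equal_allowed_combination := by
  intro items _ _
  unfold Spec_allowed_combination allowed_combination allowed_combination_alt
  rw [ac_fold_counts]
  simp only [Nat.zero_add]
  split_ifs <;> simp_all
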